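-- pv_equiv track=rewrite | github.com/Dripmaster/opendora | apps/orchestrator_py/src/orchestrator/adapters/discord_gateway.py | append_memo_to_topic
-- ===== SOURCE A (Python) =====
-- def append_memo_to_topic(
--     current_topic: str, memo_text: str, max_len: int = 1024
-- ) -> str:
--     prefix = "[opendora-memo]"
--     lines = [x.strip() for x in (current_topic or "").split("\n") if x.strip()]
--     if not lines or lines[0] != prefix:
--         lines = [prefix]
--     memo_line = f"- {memo_text}"
--     lines.append(memo_line)
--     while len("\n".join(lines)) > max_len and len(lines) > 2:
--         lines.pop(1)
--     topic = "\n".join(lines)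
--     if len(topic) > max_len:
--         topic = topic[: max_len - 1] + "…"
--     return topic
-- ===== SOURCE B (Python) =====
-- def append_memo_to_topic(
--     current_topic: str, memo_text: str, max_len: int = 1024
-- ) -> str:
--     prefix = "[opendora-memo]"
--     lines = [s for s in map(str.strip, current_topic.split("\n")) if s]
--     if lines[:1] != [prefix]:
--         lines = [prefix]
--     memo_line = f"- {memo_text}"
--     older = lines[1:]
--     # decide the kept suffix up front: walk the older memo lines newest-to-oldest,
--     # accumulating the character budget; the new memo line is always kept
--     kept_rev = [memo_line]
--     used = len(prefix) + 1 + len(memo_line)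
--     for line in reversed(older):
--         cost = len(line) + 1
--         if used + cost > max_len:
--             break
--         kept_rev.append(line)
--         used += cost
--     topic = "\n".join([prefix] + kept_rev[::-1])
--     return topic if len(topic) <= max_len else topic[: max_len - 1] + "…"
-- ===== Notes on version B (the rewrite author's own statement) =====
-- stated objective: alternative
-- what changed: Replaces the quadratic pop-and-rejoin while loop (which re-joins all lines on every pop) with a single newest-to-oldest pass over the memo lines that accumulates character costs to pick the fitting suffix, then joins once.
import Mathlib
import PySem

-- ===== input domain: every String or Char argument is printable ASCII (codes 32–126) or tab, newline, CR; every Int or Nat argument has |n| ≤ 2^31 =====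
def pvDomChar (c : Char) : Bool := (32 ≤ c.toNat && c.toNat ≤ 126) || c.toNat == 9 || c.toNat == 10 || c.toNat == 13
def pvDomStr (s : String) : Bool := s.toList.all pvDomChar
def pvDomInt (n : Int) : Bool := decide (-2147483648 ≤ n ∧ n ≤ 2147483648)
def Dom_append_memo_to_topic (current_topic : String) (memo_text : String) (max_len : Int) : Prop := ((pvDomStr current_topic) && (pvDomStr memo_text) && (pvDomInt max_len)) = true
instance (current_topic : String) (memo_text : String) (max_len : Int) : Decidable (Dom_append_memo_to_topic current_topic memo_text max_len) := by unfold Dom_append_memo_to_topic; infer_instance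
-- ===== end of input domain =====

-- B replaces A's pop-one-line-and-rejoin-everything while loop by a single newest-to-oldest
-- pass that accumulates character costs to pick the kept suffix, then joins once (alternative decomposition).

-- ===== PORT A =====
-- the while loop: `while len("\n".join(lines)) > max_len and len(lines) > 2: lines.pop(1)`
def pvPopLoopA (maxLen : Int) : List (List Char) → List (List Char)
  | [] => []
  | [a] => [a]
  | a :: b :: rest =>
    if PySem.Chars.len (PySem.Chars.join ['\n'] (a :: b :: rest)) > maxLen ∧
       PySem.List.len (a :: b :: rest) > 2 then
      pvPopLoopA maxLen (a :: rest)     -- lines.pop(1)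
    else a :: b :: rest
termination_by l => l.length
decreasing_by simp

def append_memo_to_topic (current_topic : String) (memo_text : String) (max_len : Int) : String :=
  let pfx := "[opendora-memo]".toList
  -- `(current_topic or "")` equals current_topic for .split (empty string splits to one empty piece, filtered out)
  let lines := ((PySem.Chars.splitOn current_topic.toList ['\n']).map PySem.Chars.strip).filter
      (fun x => !x.isEmpty)
  let lines := if lines = [] ∨ PySem.List.pyGet? lines 0 ≠ some pfx then [pfx] else lines
  let memo_line := '-' :: ' ' :: memo_text.toList      -- f"- {memo_text}"
  let lines := lines ++ [memo_line]
  let lines := pvPopLoopA max_len lines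
  let topic := PySem.Chars.join ['\n'] lines
  let topic := if PySem.Chars.len topic > max_len then
      PySem.Chars.slice topic none (some (max_len - 1)) ++ ['…'] else topic
  String.ofList topic

-- ===== PORT B =====
-- the for loop with break: walk the older memo lines newest first, accumulating used + cost
def pvKeptRev (maxLen : Int) : Int → List (List Char) → List (List Char) → List (List Char)
  | _, [], acc => acc
  | used, line :: rest, acc =>
    let cost := PySem.Chars.len line + 1
    if used + cost > maxLen then acc     -- break
    else pvKeptRev maxLen (used + cost) rest (acc ++ [line])

def append_memo_to_topic_alt (current_topic : String) (memo_text : String) (max_len : Int) : String :=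
  let pfx := "[opendora-memo]".toList
  let lines := ((PySem.Chars.splitOn current_topic.toList ['\n']).map PySem.Chars.strip).filter
      (fun s => s ≠ [])
  let lines := if PySem.List.slice lines none (some 1) ≠ [pfx] then [pfx] else lines
  let memo_line := '-' :: ' ' :: memo_text.toList
  let older := PySem.List.slice lines (some 1) none     -- lines[1:]
  let kept_rev := pvKeptRev max_len
      (PySem.Chars.len pfx + 1 + PySem.Chars.len memo_line) older.reverse [memo_line]
  let topic := PySem.Chars.join ['\n'] ([pfx] ++ kept_rev.reverse)
  if PySem.Chars.len topic ≤ max_len then String.ofList topic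
  else String.ofList (PySem.Chars.slice topic none (some (max_len - 1)) ++ ['…'])

-- ===== PRECONDITION & SPEC =====
def Spec_append_memo_to_topic (current_topic : String) (memo_text : String) (max_len : Int) (out : String) : Prop := out = append_memo_to_topic_alt current_topic memo_text max_len
instance (current_topic : String) (memo_text : String) (max_len : Int) (out : String) : Decidable (Spec_append_memo_to_topic current_topic memo_text max_len out) := by unfold Spec_append_memo_to_topic; infer_instance

-- ===== CLAIM (what is proved, stated in full; the proofs are below) =====
def Claim_equal_append_memo_to_topic : Prop := ∀ (current_topic : String) (memo_text : String) (max_len : Int), Dom_append_memo_to_topic current_topic memo_text max_len → Spec_append_memo_to_topic current_topic memo_text max_len (append_memo_to_topic current_topic memo_text max_len)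

-- ===== LEMMAS AND PROOFS =====

/-- total cost (length + newline) of a block of lines -/
def pvCostS (ls : List (List Char)) : Int := (ls.map (fun l => PySem.Chars.len l + 1)).sum

lemma pvCostS_nonneg (ls : List (List Char)) : 0 ≤ pvCostS ls := by
  unfold pvCostS
  apply List.sum_nonneg
  intro x hx
  simp only [List.mem_map] at hx
  obtain ⟨l, _, rfl⟩ := hx
  have := PySem.Chars.len_eq l
  omega

lemma pvCostS_cons (a : List Char) (t : List (List Char)) :
    pvCostS (a :: t) = PySem.Chars.len a + 1 + pvCostS t := by
  simp [pvCostS]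

lemma pvCostS_append (s t : List (List Char)) :
    pvCostS (s ++ t) = pvCostS s + pvCostS t := by
  simp [pvCostS]

lemma pvCostS_reverse (ls : List (List Char)) : pvCostS ls.reverse = pvCostS ls := by
  simp [pvCostS]

/-- length of a "\n"-join of a nonempty block -/
lemma pvJoin_len (a : List Char) (t : List (List Char)) :
    PySem.Chars.len (PySem.Chars.join ['\n'] (a :: t)) = PySem.Chars.len a + pvCostS t := by
  induction t generalizing a with
  | nil => simp [PySem.Chars.join_singleton, pvCostS]
  | cons b r ih =>
    rw [PySem.Chars.join_cons_cons, pvCostS_cons]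
    have hb := ih b
    simp only [PySem.Chars.len_eq, List.length_append, List.length_cons,
      List.length_nil] at hb ⊢
    push_cast at hb ⊢
    omega

/-- B's loop consumes everything when the whole budget fits -/
lemma pvKeptRev_all (maxLen u : Int) (xs acc : List (List Char))
    (h : u + pvCostS xs ≤ maxLen) : pvKeptRev maxLen u xs acc = acc ++ xs := by
  induction xs generalizing u acc with
  | nil => simp [pvKeptRev]
  | cons x r ih =>
    rw [pvCostS_cons] at h
    have hr := pvCostS_nonneg r
    simp only [pvKeptRev]
    rw [if_neg (by omega)]
    rw [ih _ _ (by omega)]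
    simp

/-- peeling the OLDEST line (last of the reversed list) off B's loop -/
lemma pvKeptRev_last (maxLen u : Int) (xs acc : List (List Char)) (r : List Char) :
    pvKeptRev maxLen u (xs ++ [r]) acc =
      if u + pvCostS xs + (PySem.Chars.len r + 1) ≤ maxLen
      then pvKeptRev maxLen u xs acc ++ [r]
      else pvKeptRev maxLen u xs acc := by
  induction xs generalizing u acc with
  | nil =>
    simp only [List.nil_append, pvKeptRev, pvCostS, List.map_nil, List.sum_nil]
    split_ifs <;> first | rfl | (exfalso; omega)
  | cons x t ih =>
    rw [pvCostS_cons]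
    have ht := pvCostS_nonneg t
    have hx := PySem.Chars.len_eq x
    have hr := PySem.Chars.len_eq r
    rw [List.cons_append]
    simp only [pvKeptRev]
    by_cases h : u + (PySem.Chars.len x + 1) > maxLen
    · rw [if_pos h, if_pos h, if_neg (by omega)]
    · rw [if_neg h, if_neg h, ih]
      split_ifs <;> first | rfl | (exfalso; omega)

/-- the heart: A's pop loop = prefix + B's backwards-accumulated suffix -/
lemma pvMain (maxLen : Int) (pfx m : List Char) (rest : List (List Char)) :
    pvPopLoopA maxLen (pfx :: (rest ++ [m])) =
      pfx :: (pvKeptRev maxLen (PySem.Chars.len pfx + 1 + PySem.Chars.len m)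
                rest.reverse [m]).reverse := by
  induction rest with
  | nil =>
    rw [List.nil_append, pvPopLoopA]
    rw [if_neg (by simp [PySem.List.len])]
    simp [pvKeptRev]
  | cons r rs ih =>
    rw [List.cons_append, pvPopLoopA]
    have hjoin := pvJoin_len pfx (r :: (rs ++ [m]))
    have hlen : PySem.List.len (pfx :: r :: (rs ++ [m])) > 2 := by
      simp [PySem.List.len]; omega
    have hcs : pvCostS (r :: (rs ++ [m])) =
        (PySem.Chars.len r + 1) + pvCostS rs + (PySem.Chars.len m + 1) := by
      rw [pvCostS_cons, pvCostS_append, pvCostS_cons]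
      simp [pvCostS]; ring
    have hkr : pvKeptRev maxLen (PySem.Chars.len pfx + 1 + PySem.Chars.len m)
        (rs.reverse ++ [r]) [m] =
        if PySem.Chars.len pfx + 1 + PySem.Chars.len m + pvCostS rs + (PySem.Chars.len r + 1) ≤ maxLen
        then pvKeptRev maxLen (PySem.Chars.len pfx + 1 + PySem.Chars.len m) rs.reverse [m] ++ [r]
        else pvKeptRev maxLen (PySem.Chars.len pfx + 1 + PySem.Chars.len m) rs.reverse [m] := by
      rw [pvKeptRev_last, pvCostS_reverse]
    by_cases hbig : PySem.Chars.len (PySem.Chars.join ['\n'] (pfx :: r :: (rs ++ [m]))) > maxLen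
    · rw [if_pos ⟨hbig, hlen⟩, ih]
      rw [List.reverse_cons, hkr, if_neg (by rw [hjoin, hcs] at hbig; omega)]
    · rw [if_neg (by tauto)]
      rw [hjoin, hcs] at hbig
      have hmr := PySem.Chars.len_eq r
      rw [List.reverse_cons, hkr, if_pos (by omega)]
      rw [pvKeptRev_all _ _ _ _ (by rw [pvCostS_reverse]; omega)]
      simp

/-- after the reset, the line list always starts with the prefix -/
lemma pvHead (ls : List (List Char)) (pfx : List Char)
    (h : ¬(ls = [] ∨ PySem.List.pyGet? ls 0 ≠ some pfx)) : ls = pfx :: ls.tail := by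
  rcases ls with _ | ⟨a, t⟩
  · exact absurd (Or.inl rfl) h
  · have h2 : PySem.List.pyGet? (a :: t) 0 = some pfx := by
      by_contra hc; exact h (Or.inr hc)
    rw [PySem.List.pyGet?_zero] at h2
    simp only [List.getElem?_cons_zero, Option.some.injEq] at h2
    rw [h2]
    rfl

/-- pvMain stated over the shared `lines` value of the two ports -/
lemma pvTail (maxLen : Int) (pfx m : List Char) (lines : List (List Char))
    (hshape : lines = pfx :: lines.tail) :
    pvPopLoopA maxLen (lines ++ [m]) =
      [pfx] ++ (pvKeptRev maxLen (PySem.Chars.len pfx + 1 + PySem.Chars.len m)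
        (PySem.List.slice lines (some 1) none).reverse [m]).reverse := by
  rw [PySem.List.slice_from_one, hshape]
  simp only [List.tail_cons, List.cons_append]
  rw [pvMain]
  rfl

/-- B's filter predicate agrees with A's -/
lemma pvFilter (l : List (List Char)) :
    l.filter (fun s => s ≠ []) = l.filter (fun x => !x.isEmpty) := by
  apply List.filter_congr
  intro x _
  cases x <;> simp

/-- B's `lines[:1] != [prefix]` reset agrees with A's `not lines or lines[0] != prefix` -/
lemma pvReset (L : List (List Char)) (pfx : List Char) :
    (if PySem.List.slice L none (some 1) ≠ [pfx] then [pfx] else L) =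
    (if L = [] ∨ PySem.List.pyGet? L 0 ≠ some pfx then [pfx] else L) := by
  rcases L with _ | ⟨a, t⟩
  · simp [PySem.List.slice]
  · have hs : PySem.List.slice (a :: t) none (some 1) = [a] := by
      simp [PySem.List.slice, PySem.List.clampIdx]
    rw [hs]
    simp only [PySem.List.pyGet?_zero, List.getElem?_cons_zero]
    by_cases h : a = pfx
    · simp [h]
    · rw [if_pos (by simp [h]), if_pos (by simp [h])]

/-- B's `topic if len(topic) <= max_len else …` agrees with A's `if len(topic) > max_len` -/
lemma pvTrunc (T : List Char) (ml : Int) :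
    (if PySem.Chars.len T ≤ ml then String.ofList T
     else String.ofList (PySem.Chars.slice T none (some (ml - 1)) ++ ['…'])) =
    String.ofList (if PySem.Chars.len T > ml then
      PySem.Chars.slice T none (some (ml - 1)) ++ ['…'] else T) := by
  by_cases h : PySem.Chars.len T ≤ ml
  · rw [if_pos h, if_neg (by omega)]
  · rw [if_neg h, if_pos (by omega)]

-- ===== VERDICT (by name: the statement is the Claim_ definition above) =====
theorem append_memo_to_topic_spec : Claim_equal_append_memo_to_topic := by
  intro ct mt ml _
  unfold Spec_append_memo_to_topic append_memo_to_topic append_memo_to_topic_alt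
  simp only []
  rw [pvFilter, pvReset, pvTrunc]
  have hshape : (if ((PySem.Chars.splitOn ct.toList ['\n']).map PySem.Chars.strip).filter
        (fun x => !x.isEmpty) = [] ∨
        PySem.List.pyGet? (((PySem.Chars.splitOn ct.toList ['\n']).map PySem.Chars.strip).filter
          (fun x => !x.isEmpty)) 0 ≠ some "[opendora-memo]".toList
      then ["[opendora-memo]".toList]
      else ((PySem.Chars.splitOn ct.toList ['\n']).map PySem.Chars.strip).filter
        (fun x => !x.isEmpty)) =
      "[opendora-memo]".toList ::
      (if ((PySem.Chars.splitOn ct.toList ['\n']).map PySem.Chars.strip).filter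
        (fun x => !x.isEmpty) = [] ∨
        PySem.List.pyGet? (((PySem.Chars.splitOn ct.toList ['\n']).map PySem.Chars.strip).filter
          (fun x => !x.isEmpty)) 0 ≠ some "[opendora-memo]".toList
      then ["[opendora-memo]".toList]
      else ((PySem.Chars.splitOn ct.toList ['\n']).map PySem.Chars.strip).filter
        (fun x => !x.isEmpty)).tail := by
    by_cases h : ((PySem.Chars.splitOn ct.toList ['\n']).map PySem.Chars.strip).filter
        (fun x => !x.isEmpty) = [] ∨
        PySem.List.pyGet? (((PySem.Chars.splitOn ct.toList ['\n']).map PySem.Chars.strip).filter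
          (fun x => !x.isEmpty)) 0 ≠ some "[opendora-memo]".toList
    · rw [if_pos h]
      rfl
    · rw [if_neg h]
      exact pvHead _ _ h
  rw [pvTail ml "[opendora-memo]".toList ('-' :: ' ' :: mt.toList) _ hshape]
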